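-- pv_equiv track=rewrite | github.com/pypi-data/pypi-mirror-35 | packages/lvr/lvr-0.1-py3-none-any.whl/lvr/helpers.py | skip_equivalent_effect_values
-- ===== SOURCE A (Python) =====
-- def skip_equivalent_effect_values(causes_effects):
--     """Returns only first key: value mapping for equivalent
--     effect values."""
--     effects = set()
--     result = dict()
--     for cause, effect in causes_effects.items():
--         if effect not in effects:
--             effects.add(effect)
--             result[cause] = effect
--     return result
-- ===== SOURCE B (Python) =====
-- def skip_equivalent_effect_values(causes_effects):
--     """Returns only first key: value mapping for equivalent
--     effect values."""
--     pairs = list(causes_effects.items())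
--     kept = []
--     while pairs:
--         cause, effect = pairs[0]
--         kept.append((cause, effect))
--         pairs = [(c, e) for c, e in pairs[1:] if e != effect]
--     return dict(kept)
-- ===== Notes on version B (the rewrite author's own statement) =====
-- stated objective: alternative
-- what changed: B replaces A's single pass with a seen-set and result dict by a filter-the-tail loop: keep the head pair, drop every remaining pair sharing its effect, repeat on what is left, and build the dict from the kept list; no membership structure is maintained, at the cost of quadratic worst-case time.
import Mathlib
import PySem

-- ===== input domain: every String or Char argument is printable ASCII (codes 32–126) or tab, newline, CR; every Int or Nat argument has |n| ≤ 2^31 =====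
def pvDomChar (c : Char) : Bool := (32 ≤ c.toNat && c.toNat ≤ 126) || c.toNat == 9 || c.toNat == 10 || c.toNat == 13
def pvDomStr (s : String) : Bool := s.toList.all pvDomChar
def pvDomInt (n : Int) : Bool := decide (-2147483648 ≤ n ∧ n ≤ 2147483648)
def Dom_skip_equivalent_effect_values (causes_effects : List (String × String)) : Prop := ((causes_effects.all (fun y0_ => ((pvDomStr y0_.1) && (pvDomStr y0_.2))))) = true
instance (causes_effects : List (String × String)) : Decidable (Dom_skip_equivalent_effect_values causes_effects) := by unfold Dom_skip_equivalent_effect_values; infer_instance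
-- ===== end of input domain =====

-- B replaces A's seen-set single pass by a recursive filter-the-tail algorithm (keep head,
-- drop same-effect pairs from the tail, recurse, build the dict at the end); same result.

-- ===== PORT A =====
-- A: effects = set(); result = dict(); for cause, effect in items: if effect not in effects: add + insert.
def skip_equivalent_effect_values (causes_effects : List (String × String)) : List (String × String) :=
  (causes_effects.foldl
    (fun (st : PySem.Set String × PySem.Dict String String) p =>
      if (PySem.Set.contains st.1 p.2) then st
      else (PySem.Set.add st.1 p.2, st.2.insert p.1 p.2))
    (PySem.Set.empty, PySem.Dict.empty)).2.items

-- ===== PORT B =====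
-- B's while loop: keep the head pair, continue on the tail with that effect filtered out
-- (the loop state 'pairs' shrinks each round; transcribed as recursion on that list).
def pvGo : List (String × String) → List (String × String)
  | [] => []
  | (c, e) :: rest => (c, e) :: pvGo (rest.filter (fun q => q.2 != e))
termination_by l => l.length
decreasing_by
  have h := List.length_filter_le (fun x => x.1.2 != e) rest.attach
  simp only [List.length_attach] at h
  simpa [List.length_unattach] using Nat.lt_succ_of_le h

-- B: return dict(kept)  (kept = the pairs the loop keeps, in order)
def skip_equivalent_effect_values_alt (causes_effects : List (String × String)) : List (String × String) :=
  ((pvGo causes_effects).foldl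
    (fun (d : PySem.Dict String String) p => d.insert p.1 p.2) PySem.Dict.empty).items

-- ===== PRECONDITION & SPEC =====
def Spec_skip_equivalent_effect_values (causes_effects : List (String × String)) (out : List (String × String)) : Prop := out = skip_equivalent_effect_values_alt causes_effects
instance (causes_effects : List (String × String)) (out : List (String × String)) : Decidable (Spec_skip_equivalent_effect_values causes_effects out) := by unfold Spec_skip_equivalent_effect_values; infer_instance

-- ===== CLAIM (what is proved, stated in full; the proofs are below) =====
def Claim_equal_skip_equivalent_effect_values : Prop := ∀ (causes_effects : List (String × String)), Dom_skip_equivalent_effect_values causes_effects → Spec_skip_equivalent_effect_values causes_effects (skip_equivalent_effect_values causes_effects)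

-- ===== LEMMAS AND PROOFS =====

theorem pvGo_nil : pvGo [] = [] := by simp [pvGo]

theorem pvGo_cons (c e : String) (rest : List (String × String)) :
    pvGo ((c,e) :: rest) = (c,e) :: pvGo (rest.filter (fun q => q.2 != e)) := by
  simp [pvGo]

-- Invariant: running A's loop from state (eff, res) produces the same dict as inserting, into res,
-- the pairs B's go keeps from the suffix once the effects already in eff are filtered away.
theorem pvLoop_inv (l : List (String × String))
    (eff : PySem.Set String) (res : PySem.Dict String String) :
    (l.foldl
      (fun (st : PySem.Set String × PySem.Dict String String) p =>
        if (PySem.Set.contains st.1 p.2) then st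
        else (PySem.Set.add st.1 p.2, st.2.insert p.1 p.2))
      (eff, res)).2
    = (pvGo (l.filter (fun q => !(PySem.Set.contains eff q.2)))).foldl
        (fun (d : PySem.Dict String String) p => d.insert p.1 p.2) res := by
  induction l generalizing eff res with
  | nil => simp [pvGo_nil]
  | cons p t ih =>
    simp only [List.foldl_cons, List.filter_cons]
    by_cases h : PySem.Set.contains eff p.2 = true
    · rw [if_pos h]
      have hb : (!PySem.Set.contains eff p.2) = false := by rw [h]; rfl
      rw [hb]
      simpa using ih eff res
    · rw [if_neg h]
      have h' : PySem.Set.contains eff p.2 = false := eq_false_of_ne_true h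
      have hb : (!PySem.Set.contains eff p.2) = true := by rw [h']; rfl
      rw [hb, if_pos rfl]
      obtain ⟨c, e⟩ := p
      rw [ih (PySem.Set.add eff e) (res.insert c e), pvGo_cons, List.foldl_cons,
        List.filter_filter]
      congr 2
      apply List.filter_congr
      intro q _
      by_cases hq : q.2 = e
      · simp [hq]
      · simp [PySem.Set.mem_add, hq]

-- ===== VERDICT (by name: the statement is the Claim_ definition above) =====
theorem skip_equivalent_effect_values_spec : Claim_equal_skip_equivalent_effect_values := by
  intro ce _
  unfold Spec_skip_equivalent_effect_values skip_equivalent_effect_values skip_equivalent_effect_values_alt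
  rw [pvLoop_inv]
  refine congrArg _ (congrArg _ (congrArg _ (List.filter_eq_self.mpr ?_)))
  intro a _
  rfl
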